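-- pv_equiv track=rewrite | github.com/abhishekdaz/playstore-review-scraper | analysis_engine.py | _fallback_keyword_clustering
-- ===== SOURCE A (Python) =====
-- def _fallback_keyword_clustering(negative_reviews):
--     """Fallback keyword-based clustering when semantic clustering is not available"""
--     issue_themes = {
--         "Payment & Billing Problems": [
--             "payment", "billing", "charge", "charged", "refund", "money", "cost",
--             "price", "subscription", "cancel", "credit card", "paypal",
--             "transaction", "purchase", "buy", "paid", "expensive", "free trial"
--         ],
--         "Login & Account Issues": [
--             "login", "log in", "sign in", "signin", "account", "password", "username",
--             "forgot password", "locked out", "can't access", "verification", "authenticate",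
--             "register", "signup"
--         ],
--         "App Crashes & Freezing": [
--             "crash", "crashes", "freeze", "frozen", "hang", "stuck", "not responding",
--             "closes", "shuts down", "stops working", "black screen"
--         ],
--         "Slow Performance": [
--             "slow", "lag", "laggy", "loading", "performance", "speed", "responsive",
--             "takes forever", "long time", "waiting"
--         ],
--         "Technical Bugs & Errors": [
--             "bug", "error", "glitch", "broken", "not working", "doesn't work",
--             "malfunction", "issue", "problem", "fail", "failed", "wrong"
--         ],
--         "User Interface Problems": [
--             "interface", "ui", "design", "layout", "confusing", "hard to use",
--             "navigation", "menu", "button", "click", "tap", "screen", "display"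
--         ],
--         "Missing Features": [
--             "feature", "add", "need", "want", "wish", "should have", "missing",
--             "improvement", "better", "enhance", "update", "would like"
--         ],
--         "Customer Support Issues": [
--             "support", "help", "service", "customer", "response", "reply", "contact",
--             "assistance", "staff", "team", "representative", "no response"
--         ],
--         "Scam & Fraud Reports": [
--             "scam", "fraud", "fake", "spam", "suspicious", "cheat", "steal",
--             "money back", "rip off", "dishonest", "misleading"
--         ]
--     }
--
--     # Group reviews by themes
--     theme_reviews = {theme: [] for theme in issue_themes}
--     unmatched_reviews = []
--
--     for review in negative_reviews:
--         review_text = review.get('content', '').lower()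
--         matched = False
--
--         for theme, keywords in issue_themes.items():
--             if any(keyword in review_text for keyword in keywords):
--                 theme_reviews[theme].append(review)
--                 matched = True
--                 break
--
--         if not matched:
--             unmatched_reviews.append(review)
--
--     # Add unmatched reviews as "General Complaints"
--     if unmatched_reviews:
--         theme_reviews["General Complaints"] = unmatched_reviews
--
--     # Convert to cluster format
--     clusters = {}
--     cluster_id = 0
--     for theme, reviews in theme_reviews.items():
--         if reviews:  # Only include non-empty themes
--             clusters[cluster_id] = reviews
--             cluster_id += 1
--
--     return clusters
-- ===== SOURCE B (Python) =====
-- def _fallback_keyword_clustering(negative_reviews):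
--     """Theme-major keyword clustering: each theme claims, in input order, every
--     not-yet-claimed review containing one of its keywords; leftovers go last."""
--     issue_themes = {
--         "Payment & Billing Problems": [
--             "payment", "billing", "charge", "charged", "refund", "money", "cost",
--             "price", "subscription", "cancel", "credit card", "paypal",
--             "transaction", "purchase", "buy", "paid", "expensive", "free trial"
--         ],
--         "Login & Account Issues": [
--             "login", "log in", "sign in", "signin", "account", "password", "username",
--             "forgot password", "locked out", "can't access", "verification", "authenticate",
--             "register", "signup"
--         ],
--         "App Crashes & Freezing": [
--             "crash", "crashes", "freeze", "frozen", "hang", "stuck", "not responding",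
--             "closes", "shuts down", "stops working", "black screen"
--         ],
--         "Slow Performance": [
--             "slow", "lag", "laggy", "loading", "performance", "speed", "responsive",
--             "takes forever", "long time", "waiting"
--         ],
--         "Technical Bugs & Errors": [
--             "bug", "error", "glitch", "broken", "not working", "doesn't work",
--             "malfunction", "issue", "problem", "fail", "failed", "wrong"
--         ],
--         "User Interface Problems": [
--             "interface", "ui", "design", "layout", "confusing", "hard to use",
--             "navigation", "menu", "button", "click", "tap", "screen", "display"
--         ],
--         "Missing Features": [
--             "feature", "add", "need", "want", "wish", "should have", "missing",
--             "improvement", "better", "enhance", "update", "would like"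
--         ],
--         "Customer Support Issues": [
--             "support", "help", "service", "customer", "response", "reply", "contact",
--             "assistance", "staff", "team", "representative", "no response"
--         ],
--         "Scam & Fraud Reports": [
--             "scam", "fraud", "fake", "spam", "suspicious", "cheat", "steal",
--             "money back", "rip off", "dishonest", "misleading"
--         ]
--     }
--
--     claimed = set()
--     buckets = []
--     for theme, keywords in issue_themes.items():
--         bucket = []
--         for i, review in enumerate(negative_reviews):
--             if i in claimed:
--                 continue
--             text = review.get('content', '').lower()
--             if any(keyword in text for keyword in keywords):
--                 claimed.add(i)
--                 bucket.append(review)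
--         buckets.append(bucket)
--
--     leftover = [r for i, r in enumerate(negative_reviews) if i not in claimed]
--     if leftover:
--         buckets.append(leftover)
--
--     return {cid: b for cid, b in enumerate(b for b in buckets if b)}
-- ===== Notes on version B (the rewrite author's own statement) =====
-- stated objective: alternative
-- what changed: Inverted the loop nesting: instead of scanning themes per review (review-major with break on first match), B loops over themes in their fixed order and lets each theme claim, by index, every not-yet-claimed review containing one of its keywords; leftovers become the last bucket and non-empty buckets are renumbered by enumerate instead of a manual counter.
import Mathlib
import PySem

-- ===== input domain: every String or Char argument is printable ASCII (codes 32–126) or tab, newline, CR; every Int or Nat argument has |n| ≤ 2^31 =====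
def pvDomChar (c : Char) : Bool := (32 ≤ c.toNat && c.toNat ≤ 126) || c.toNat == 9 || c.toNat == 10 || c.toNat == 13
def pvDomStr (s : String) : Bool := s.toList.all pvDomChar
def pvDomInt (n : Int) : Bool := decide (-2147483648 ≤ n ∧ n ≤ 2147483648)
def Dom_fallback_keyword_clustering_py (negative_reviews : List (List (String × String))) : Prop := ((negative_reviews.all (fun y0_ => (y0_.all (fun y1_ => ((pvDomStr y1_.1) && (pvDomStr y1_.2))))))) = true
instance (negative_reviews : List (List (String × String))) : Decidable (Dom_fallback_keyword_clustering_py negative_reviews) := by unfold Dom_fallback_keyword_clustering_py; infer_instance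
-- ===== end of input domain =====

-- B inverts the loop nesting (theme-major claiming by index instead of review-major
-- first-match with break) and renumbers non-empty buckets by enumerate; alternative
-- decomposition, same results.

-- ===== PORT A =====
-- the literal issue_themes table (shared data of both Pythons)
def pvThemes : List (String × List String) := [
  ("Payment & Billing Problems", ["payment", "billing", "charge", "charged", "refund", "money", "cost",
      "price", "subscription", "cancel", "credit card", "paypal",
      "transaction", "purchase", "buy", "paid", "expensive", "free trial"]),
  ("Login & Account Issues", ["login", "log in", "sign in", "signin", "account", "password", "username",
      "forgot password", "locked out", "can't access", "verification", "authenticate",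
      "register", "signup"]),
  ("App Crashes & Freezing", ["crash", "crashes", "freeze", "frozen", "hang", "stuck", "not responding",
      "closes", "shuts down", "stops working", "black screen"]),
  ("Slow Performance", ["slow", "lag", "laggy", "loading", "performance", "speed", "responsive",
      "takes forever", "long time", "waiting"]),
  ("Technical Bugs & Errors", ["bug", "error", "glitch", "broken", "not working", "doesn't work",
      "malfunction", "issue", "problem", "fail", "failed", "wrong"]),
  ("User Interface Problems", ["interface", "ui", "design", "layout", "confusing", "hard to use",
      "navigation", "menu", "button", "click", "tap", "screen", "display"]),
  ("Missing Features", ["feature", "add", "need", "want", "wish", "should have", "missing",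
      "improvement", "better", "enhance", "update", "would like"]),
  ("Customer Support Issues", ["support", "help", "service", "customer", "response", "reply", "contact",
      "assistance", "staff", "team", "representative", "no response"]),
  ("Scam & Fraud Reports", ["scam", "fraud", "fake", "spam", "suspicious", "cheat", "steal",
      "money back", "rip off", "dishonest", "misleading"])]

-- review.get('content', '').lower()  (same line appears in both Pythons)
def pvText (r : List (String × String)) : String :=
  PySem.Str.lower ((PySem.Dict.mk r).getD "content" "")

-- any(keyword in review_text for keyword in keywords)
def pvMatches (kws : List String) (text : String) : Bool :=
  kws.any (fun k => PySem.Str.isIn k text)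

-- A's inner 'for theme, keywords ... break' loop: name of the first matching theme
def pvFirstTheme : List (String × List String) → String → Option String
  | [], _ => none
  | p :: rest, text => if pvMatches p.2 text then some p.1 else pvFirstTheme rest text

-- A's body of 'for review in negative_reviews': append to the matched theme's dict
-- slot (assoc-list update) or to unmatched_reviews
def pvStepA (st : List (String × List (List (String × String))) × List (List (String × String)))
    (r : List (String × String)) :
    List (String × List (List (String × String))) × List (List (String × String)) :=
  match pvFirstTheme pvThemes (pvText r) with
  | some t => (st.1.map (fun p => if p.1 = t then (p.1, p.2 ++ [r]) else p), st.2)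
  | none => (st.1, st.2 ++ [r])

def fallback_keyword_clustering_py (negative_reviews : List (List (String × String))) :
    List (Int × List (List (String × String))) :=
  let st := negative_reviews.foldl pvStepA (pvThemes.map (fun p => (p.1, [])), [])
  let tr := if st.2.isEmpty then st.1 else st.1 ++ [("General Complaints", st.2)]
  (tr.foldl (fun (acc : List (Int × List (List (String × String))) × Int) p =>
      if p.2.isEmpty then acc else (acc.1 ++ [(acc.2, p.2)], acc.2 + 1)) ([], 0)).1

-- ===== PORT B =====
-- B's inner 'for i, review in enumerate(negative_reviews)' loop body
def pvStepInner (kws : List String)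
    (st : PySem.Set Int × List (List (String × String))) (ir : Int × List (String × String)) :
    PySem.Set Int × List (List (String × String)) :=
  if PySem.Set.contains st.1 ir.1 then st
  else if pvMatches kws (pvText ir.2) then (PySem.Set.add st.1 ir.1, st.2 ++ [ir.2]) else st

-- B's outer 'for theme, keywords in issue_themes.items()' loop body
def pvStepOuter (rs : List (List (String × String)))
    (st : PySem.Set Int × List (List (List (String × String)))) (p : String × List String) :
    PySem.Set Int × List (List (List (String × String))) :=
  let inner := (PySem.List.enumerate rs).foldl (pvStepInner p.2) (st.1, [])
  (inner.1, st.2 ++ [inner.2])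

def fallback_keyword_clustering_py_alt (negative_reviews : List (List (String × String))) :
    List (Int × List (List (String × String))) :=
  let st := pvThemes.foldl (pvStepOuter negative_reviews) (PySem.Set.empty, [])
  let leftover := (PySem.List.enumerate negative_reviews).foldl
      (fun acc ir => if PySem.Set.contains st.1 ir.1 then acc else acc ++ [ir.2]) []
  let buckets := if leftover.isEmpty then st.2 else st.2 ++ [leftover]
  PySem.List.enumerate (buckets.filter (fun b => !b.isEmpty))

-- ===== PRECONDITION & SPEC =====
def Spec_fallback_keyword_clustering_py (negative_reviews : List (List (String × String))) (out : List (Int × List (List (String × String)))) : Prop := out = fallback_keyword_clustering_py_alt negative_reviews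
instance (negative_reviews : List (List (String × String))) (out : List (Int × List (List (String × String)))) : Decidable (Spec_fallback_keyword_clustering_py negative_reviews out) := by unfold Spec_fallback_keyword_clustering_py; infer_instance

-- ===== CLAIM (what is proved, stated in full; the proofs are below) =====
def Claim_equal_fallback_keyword_clustering_py : Prop := ∀ (negative_reviews : List (List (String × String))), Dom_fallback_keyword_clustering_py negative_reviews → Spec_fallback_keyword_clustering_py negative_reviews (fallback_keyword_clustering_py negative_reviews)

-- ===== LEMMAS AND PROOFS =====

-- pvFirstTheme on an appended theme list
theorem pvFirstTheme_append (q q' : List (String × List String)) (x : String) :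
    pvFirstTheme (q ++ q') x = (pvFirstTheme q x).or (pvFirstTheme q' x) := by
  induction q with
  | nil => simp [pvFirstTheme]
  | cons p rest ih => by_cases h : pvMatches p.2 x <;> simp [pvFirstTheme, h, ih]

theorem pvFirstTheme_mem {l : List (String × List String)} {x t : String}
    (h : pvFirstTheme l x = some t) : t ∈ l.map (·.1) := by
  induction l with
  | nil => simp [pvFirstTheme] at h
  | cons p rest ih =>
    by_cases hm : pvMatches p.2 x
    · simp [pvFirstTheme, hm] at h; simp [h]
    · simp [pvFirstTheme, hm] at h; simpa using Or.inr (ih h)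

-- first match over the whole list, split at an element, under distinct names
theorem pvFirstTheme_eq_some_iff (q rest : List (String × List String))
    (p : String × List String) (x : String)
    (hnd : ((q ++ p :: rest).map (·.1)).Nodup) :
    (pvFirstTheme (q ++ p :: rest) x = some p.1) ↔
      ((pvFirstTheme q x).isSome = false ∧ pvMatches p.2 x = true) := by
  induction q with
  | nil =>
    simp only [List.nil_append, List.map_cons, List.nodup_cons] at hnd
    by_cases hm : pvMatches p.2 x
    · simp [pvFirstTheme, hm]
    · simp only [pvFirstTheme, hm, Bool.false_eq_true, if_false]
      constructor
      · intro h
        exact absurd (pvFirstTheme_mem (by simpa [pvFirstTheme, hm] using h)) hnd.1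
      · rintro ⟨-, h⟩; exact absurd h (by simpa using hm)
  | cons a q' ih =>
    simp only [List.cons_append, List.map_cons, List.nodup_cons] at hnd
    by_cases ha : pvMatches a.2 x
    · have hne : a.1 ≠ p.1 := by
        intro he; exact hnd.1 (he ▸ (by simp : p.1 ∈ ((q' ++ p :: rest).map (·.1))))
      simp [pvFirstTheme, ha, hne]
    · simpa [pvFirstTheme, ha] using ih hnd.2

-- B's canonical named buckets, theme-major
def pvNBF (rs : List (List (String × String))) :
    List (String × List String) → List (String × List String) → List (String × List (List (String × String)))
  | _, [] => []
  | pre, p :: ts =>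
      (p.1, rs.filter (fun r => !(pvFirstTheme pre (pvText r)).isSome && pvMatches p.2 (pvText r)))
        :: pvNBF rs (pre ++ [p]) ts

theorem pvNBF_eq (rs : List (List (String × String))) :
    ∀ (ts q : List (String × List String)),
    ((q ++ ts).map (·.1)).Nodup →
    pvNBF rs q ts = ts.map (fun p => (p.1,
      rs.filter (fun r => decide (pvFirstTheme (q ++ ts) (pvText r) = some p.1)))) := by
  intro ts
  induction ts with
  | nil => intro q _; simp [pvNBF]
  | cons p ts' ih =>
    intro q hnd
    have hassoc : (q ++ [p]) ++ ts' = q ++ p :: ts' := by simp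
    simp only [pvNBF, List.map_cons]
    congr 1
    · simp only [Prod.mk.injEq, true_and]
      apply List.filter_congr
      intro r _
      rw [Bool.eq_iff_iff]
      simp only [Bool.and_eq_true, Bool.not_eq_eq_eq_not, Bool.not_true, decide_eq_true_eq]
      exact (pvFirstTheme_eq_some_iff q ts' p (pvText r) hnd).symm
    · rw [ih (q ++ [p]) (by rw [hassoc]; exact hnd)]
      rw [hassoc]

-- A's review loop computes, per theme, the filter by first matching theme
theorem pvA_fold (rs : List (List (String × String))) :
    ∀ (g : (String × List String) → List (List (String × String))) (u0 : List (List (String × String))),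
    rs.foldl pvStepA (pvThemes.map (fun p => (p.1, g p)), u0)
      = (pvThemes.map (fun p => (p.1, g p ++ rs.filter (fun r => decide (pvFirstTheme pvThemes (pvText r) = some p.1)))),
         u0 ++ rs.filter (fun r => !(pvFirstTheme pvThemes (pvText r)).isSome)) := by
  induction rs with
  | nil => simp
  | cons x xs ih =>
    intro g u0
    rw [List.foldl_cons]
    cases h : pvFirstTheme pvThemes (pvText x) with
    | none =>
      have hstep : pvStepA (pvThemes.map (fun p => (p.1, g p)), u0) x
          = (pvThemes.map (fun p => (p.1, g p)), u0 ++ [x]) := by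
        simp [pvStepA, h]
      rw [hstep, ih g (u0 ++ [x])]
      simp only [List.filter_cons, Prod.mk.injEq]
      refine ⟨?_, ?_⟩
      · apply List.map_congr_left
        intro p _
        simp [h]
      · simp [h]
    | some t =>
      have hstep : pvStepA (pvThemes.map (fun p => (p.1, g p)), u0) x
          = (pvThemes.map (fun p => (p.1, if p.1 = t then g p ++ [x] else g p)), u0) := by
        simp only [pvStepA, h, List.map_map]
        congr 1
        apply List.map_congr_left
        intro p _
        by_cases hp : p.1 = t <;> simp [hp]
      rw [hstep, ih (fun p => if p.1 = t then g p ++ [x] else g p) u0]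
      simp only [List.filter_cons, Prod.mk.injEq]
      refine ⟨?_, ?_⟩
      · apply List.map_congr_left
        intro p _
        by_cases hp : p.1 = t
        · simp [hp, h]
        · simp [hp, h, Ne.symm hp]
      · simp [h]

-- Set.add/contains interaction used by the claimed-index set
theorem set_contains_add (C : PySem.Set Int) (i j : Int) :
    PySem.Set.contains (PySem.Set.add C i) j = (PySem.Set.contains C j || decide (j = i)) := by
  by_cases h : i ∈ C
  · have he : PySem.Set.add C i = C := by simp [PySem.Set.add, h]
    rw [he]
    by_cases hj : j = i
    · subst hj; simp [h]
    · simp [hj]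
  · have he : PySem.Set.add C i = C ++ [i] := by simp [PySem.Set.add, h]
    rw [he]
    simp [PySem.Set.contains]


-- B's inner loop: bucket and claimed-set characterisation
theorem pvB_inner (pre : List (String × List String)) (p : String × List String)
    (rs : List (List (String × String))) :
    ∀ (s : Nat) (C : PySem.Set Int) (bkt : List (List (String × String))),
    (∀ (k : Nat) (hk : k < rs.length),
        (PySem.Set.contains C ((s + k : Nat) : Int) = (pvFirstTheme pre (pvText (rs[k]'hk))).isSome)) →
    ((PySem.List.enumerate rs (s : Int)).foldl (pvStepInner p.2) (C, bkt)).2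
        = bkt ++ rs.filter (fun r => !(pvFirstTheme pre (pvText r)).isSome && pvMatches p.2 (pvText r))
    ∧ ∀ (i : Int), PySem.Set.contains ((PySem.List.enumerate rs (s : Int)).foldl (pvStepInner p.2) (C, bkt)).1 i
        = (PySem.Set.contains C i ||
           decide (∃ (k : Nat) (hk : k < rs.length), i = ((s + k : Nat) : Int) ∧
             ((pvFirstTheme pre (pvText (rs[k]'hk))).isSome = false ∧ pvMatches p.2 (pvText (rs[k]'hk)) = true))) := by
  induction rs with
  | nil => intro s C bkt _; simp
  | cons x xs ih =>
    intro s C bkt hC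
    have h0 : PySem.Set.contains C (s : Int) = (pvFirstTheme pre (pvText x)).isSome := by
      simpa using hC 0 (by simp)
    have hcast : ∀ k : Nat, ((s + (k + 1) : Nat) : Int) = ((s + 1 + k : Nat) : Int) := by
      intro k; push_cast; ring
    have hCs : ∀ (k : Nat) (hk : k < xs.length),
        PySem.Set.contains C ((s + 1 + k : Nat) : Int) = (pvFirstTheme pre (pvText (xs[k]'hk))).isSome := by
      intro k hk
      have := hC (k + 1) (by simpa using Nat.succ_lt_succ hk)
      rw [hcast k] at this
      simpa using this
    rw [PySem.List.enumerate_cons, List.foldl_cons]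
    by_cases hx : (pvFirstTheme pre (pvText x)).isSome = true
    · have hcs : PySem.Set.contains C (s : Int) = true := by rw [h0, hx]
      have hstep : pvStepInner p.2 (C, bkt) ((s : Int), x) = (C, bkt) := by
        simp only [pvStepInner]; rw [hcs]; simp
      rw [hstep]
      have hsucc : ((s : Int) + 1) = ((s + 1 : Nat) : Int) := by push_cast; ring
      rw [hsucc]
      obtain ⟨hb, hm⟩ := ih (s + 1) C bkt hCs
      refine ⟨by rw [hb]; simp [List.filter_cons]; intro h; rw [h] at hx; simp at hx, ?_⟩
      intro i
      rw [hm i]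
      congr 1
      rw [decide_eq_decide]
      constructor
      · rintro ⟨k, hk, hi, hcond⟩
        exact ⟨k + 1, by simpa using Nat.succ_lt_succ hk, by push_cast at hi ⊢; omega, by simpa using hcond⟩
      · rintro ⟨k, hk, hi, hcond⟩
        cases k with
        | zero =>
          have h1 : (pvFirstTheme pre (pvText x)).isSome = false := by simpa using hcond.1
          rw [hx] at h1; cases h1
        | succ k' =>
          refine ⟨k', by simpa using Nat.lt_of_succ_lt_succ hk, ?_, ?_⟩
          · push_cast at hi ⊢; omega
          · simpa using hcond
    · have hx' : (pvFirstTheme pre (pvText x)).isSome = false := by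
        simpa using hx
      have hnone : pvFirstTheme pre (pvText x) = none := by simpa using hx'
      by_cases hmx : pvMatches p.2 (pvText x) = true
      · have hcs : PySem.Set.contains C (s : Int) = false := by rw [h0, hx']
        have hstep : pvStepInner p.2 (C, bkt) ((s : Int), x)
            = (PySem.Set.add C (s : Int), bkt ++ [x]) := by
          simp only [pvStepInner]; rw [hcs]; simp [hmx]
        rw [hstep]
        have hsucc : ((s : Int) + 1) = ((s + 1 : Nat) : Int) := by push_cast; ring
        rw [hsucc]
        have hCs' : ∀ (k : Nat) (hk : k < xs.length),
            PySem.Set.contains (PySem.Set.add C (s : Int)) ((s + 1 + k : Nat) : Int)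
              = (pvFirstTheme pre (pvText (xs[k]'hk))).isSome := by
          intro k hk
          rw [set_contains_add]
          have hne : decide (((s + 1 + k : Nat) : Int) = (s : Int)) = false := by
            simp; push_cast; omega
          rw [hne, Bool.or_false, hCs k hk]
        obtain ⟨hb, hm⟩ := ih (s + 1) (PySem.Set.add C (s : Int)) (bkt ++ [x]) hCs'
        refine ⟨by rw [hb]; simp [List.filter_cons, hnone, hmx], ?_⟩
        intro i
        rw [hm i, set_contains_add]
        rw [Bool.or_assoc]
        congr 1
        rw [Bool.or_comm, ← Bool.decide_or, decide_eq_decide]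
        constructor
        · rintro (⟨k, hk, hi, hcond⟩ | hi)
          · exact ⟨k + 1, by simpa using Nat.succ_lt_succ hk, by push_cast at hi ⊢; omega, by simpa using hcond⟩
          · exact ⟨0, by simp, by simpa using hi, by simp; exact ⟨hnone, hmx⟩⟩
        · rintro ⟨k, hk, hi, hcond⟩
          cases k with
          | zero => right; simpa using hi
          | succ k' =>
            left
            refine ⟨k', by simpa using Nat.lt_of_succ_lt_succ hk, ?_, ?_⟩
            · push_cast at hi ⊢; omega
            · simpa using hcond
      · have hcs : PySem.Set.contains C (s : Int) = false := by rw [h0, hx']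
        have hstep : pvStepInner p.2 (C, bkt) ((s : Int), x) = (C, bkt) := by
          simp only [pvStepInner]; rw [hcs]; simp [hmx]
        rw [hstep]
        have hsucc : ((s : Int) + 1) = ((s + 1 : Nat) : Int) := by push_cast; ring
        rw [hsucc]
        obtain ⟨hb, hm⟩ := ih (s + 1) C bkt hCs
        refine ⟨by rw [hb]; simp [List.filter_cons, hmx], ?_⟩
        intro i
        rw [hm i]
        congr 1
        rw [decide_eq_decide]
        constructor
        · rintro ⟨k, hk, hi, hcond⟩
          exact ⟨k + 1, by simpa using Nat.succ_lt_succ hk, by push_cast at hi ⊢; omega, by simpa using hcond⟩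
        · rintro ⟨k, hk, hi, hcond⟩
          cases k with
          | zero =>
            have h2 : pvMatches p.2 (pvText x) = true := by simpa using hcond.2
            exact absurd h2 hmx
          | succ k' =>
            refine ⟨k', by simpa using Nat.lt_of_succ_lt_succ hk, ?_, ?_⟩
            · push_cast at hi ⊢; omega
            · simpa using hcond


-- B's outer loop: buckets are pvNBF, claimed is "matched by some processed theme"
theorem pvB_outer (rs : List (List (String × String))) :
    ∀ (ts pre : List (String × List String)) (C : PySem.Set Int)
      (B0 : List (List (List (String × String)))),
    (∀ (k : Nat) (hk : k < rs.length),
        (PySem.Set.contains C ((k : Nat) : Int) = (pvFirstTheme pre (pvText (rs[k]'hk))).isSome)) →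
    (ts.foldl (pvStepOuter rs) (C, B0)).2 = B0 ++ (pvNBF rs pre ts).map (·.2)
    ∧ ∀ (k : Nat) (hk : k < rs.length),
        (PySem.Set.contains (ts.foldl (pvStepOuter rs) (C, B0)).1 ((k : Nat) : Int)
          = (pvFirstTheme (pre ++ ts) (pvText (rs[k]'hk))).isSome) := by
  intro ts
  induction ts with
  | nil =>
    intro pre C B0 hC
    refine ⟨by simp [pvNBF], ?_⟩
    intro k hk
    simpa using hC k hk
  | cons p ts' ih =>
    intro pre C B0 hC
    rw [List.foldl_cons]
    have hC0 : ∀ (k : Nat) (hk : k < rs.length),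
        PySem.Set.contains C ((((0:Nat) + k : Nat)) : Int) = (pvFirstTheme pre (pvText (rs[k]'hk))).isSome := by
      intro k hk; simpa using hC k hk
    obtain ⟨hb, hm⟩ := pvB_inner pre p rs 0 C [] hC0
    have hz : (((0:Nat) : Int)) = (0 : Int) := by norm_num
    rw [hz] at hb hm
    have hC' : ∀ (k : Nat) (hk : k < rs.length),
        PySem.Set.contains ((PySem.List.enumerate rs 0).foldl (pvStepInner p.2) (C, [])).1 ((k : Nat) : Int)
          = (pvFirstTheme (pre ++ [p]) (pvText (rs[k]'hk))).isSome := by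
      intro k hk
      rw [hm ((k : Nat) : Int), hC k hk, pvFirstTheme_append]
      cases hfp : pvFirstTheme pre (pvText (rs[k]'hk)) with
      | some t => simp
      | none =>
        simp only [Option.isSome_none, Bool.false_or, Option.or, pvFirstTheme]
        rw [Bool.eq_iff_iff]
        constructor
        · intro hd
          rw [decide_eq_true_eq] at hd
          obtain ⟨k', hk', hi, hcond⟩ := hd
          have hkk : k' = k := by push_cast at hi; omega
          subst hkk
          simp [hcond.2]
        · intro hmt
          have hmt' : pvMatches p.2 (pvText (rs[k]'hk)) = true := by
            by_cases hq : pvMatches p.2 (pvText (rs[k]'hk)) = true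
            · exact hq
            · simp [hq] at hmt
          rw [decide_eq_true_eq]
          exact ⟨k, hk, by push_cast; omega, by simp [hfp], hmt'⟩
    have hstep : pvStepOuter rs (C, B0) p
        = (((PySem.List.enumerate rs 0).foldl (pvStepInner p.2) (C, [])).1,
           B0 ++ [((PySem.List.enumerate rs 0).foldl (pvStepInner p.2) (C, [])).2]) := by
      simp [pvStepOuter]
    rw [hstep]
    obtain ⟨hb', hm'⟩ := ih (pre ++ [p]) _ (B0 ++ [((PySem.List.enumerate rs 0).foldl (pvStepInner p.2) (C, [])).2]) hC'
    have hassoc : (pre ++ [p]) ++ ts' = pre ++ p :: ts' := by simp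
    refine ⟨?_, ?_⟩
    · rw [hb']
      rw [hb]
      simp [pvNBF]
    · intro k hk
      have := hm' k hk
      rw [hassoc] at this
      exact this

-- B's leftover comprehension
theorem pvB_leftover (C : PySem.Set Int) (rs : List (List (String × String))) :
    ∀ (s : Nat) (acc : List (List (String × String))),
    (∀ (k : Nat) (hk : k < rs.length),
        (PySem.Set.contains C ((s + k : Nat) : Int) = (pvFirstTheme pvThemes (pvText (rs[k]'hk))).isSome)) →
    (PySem.List.enumerate rs (s : Int)).foldl
        (fun acc ir => if PySem.Set.contains C ir.1 then acc else acc ++ [ir.2]) acc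
      = acc ++ rs.filter (fun r => !(pvFirstTheme pvThemes (pvText r)).isSome) := by
  induction rs with
  | nil => intro s acc _; simp
  | cons x xs ih =>
    intro s acc hC
    have h0 : PySem.Set.contains C (s : Int) = (pvFirstTheme pvThemes (pvText x)).isSome := by
      simpa using hC 0 (by simp)
    have hCs : ∀ (k : Nat) (hk : k < xs.length),
        PySem.Set.contains C ((s + 1 + k : Nat) : Int) = (pvFirstTheme pvThemes (pvText (xs[k]'hk))).isSome := by
      intro k hk
      have := hC (k + 1) (by simpa using Nat.succ_lt_succ hk)
      have hcast : ((s + (k + 1) : Nat) : Int) = ((s + 1 + k : Nat) : Int) := by push_cast; ring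
      rw [hcast] at this
      simpa using this
    rw [PySem.List.enumerate_cons, List.foldl_cons]
    have hsucc : ((s : Int) + 1) = ((s + 1 : Nat) : Int) := by push_cast; ring
    by_cases hx : (pvFirstTheme pvThemes (pvText x)).isSome = true
    · rw [if_pos (by rw [h0, hx])]
      rw [hsucc, ih (s + 1) acc hCs]
      simp [List.filter_cons]
      intro h
      rw [h] at hx; simp at hx
    · have hx' : (pvFirstTheme pvThemes (pvText x)).isSome = false := by simpa using hx
      rw [if_neg (by rw [h0, hx']; simp)]
      rw [hsucc, ih (s + 1) (acc ++ [x]) hCs]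
      have hnone : pvFirstTheme pvThemes (pvText x) = none := by simpa using hx'
      simp [List.filter_cons, hnone]

-- A's numbering loop = enumerate of the non-empty buckets
theorem pvA_number (l : List (String × List (List (String × String)))) :
    ∀ (acc : List (Int × List (List (String × String)))) (n : Int),
    (l.foldl (fun (acc : List (Int × List (List (String × String))) × Int) p =>
        if p.2.isEmpty then acc else (acc.1 ++ [(acc.2, p.2)], acc.2 + 1)) (acc, n)).1
      = acc ++ PySem.List.enumerate ((l.map (·.2)).filter (fun b => !b.isEmpty)) n := by
  induction l with
  | nil => simp
  | cons p rest ih =>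
    intro acc n
    by_cases h : p.2.isEmpty
    · rw [List.foldl_cons, if_pos h, ih]
      simp [h]
    · rw [List.foldl_cons, if_neg h, ih]
      simp [h, PySem.List.enumerate_cons]

-- ===== VERDICT (by name: the statement is the Claim_ definition above) =====
theorem fallback_keyword_clustering_py_spec : Claim_equal_fallback_keyword_clustering_py := by
  intro rs _
  show fallback_keyword_clustering_py rs = fallback_keyword_clustering_py_alt rs
  -- A's review loop, in closed form
  have hA : rs.foldl pvStepA (pvThemes.map (fun p => (p.1, ([] : List (List (String × String))))), ([] : List (List (String × String))))
      = (pvThemes.map (fun p => (p.1, rs.filter (fun r => decide (pvFirstTheme pvThemes (pvText r) = some p.1)))),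
         rs.filter (fun r => !(pvFirstTheme pvThemes (pvText r)).isSome)) := by
    simpa using pvA_fold rs (fun _ => []) []
  -- B's outer loop, in closed form
  have hCe : ∀ (k : Nat) (hk : k < rs.length),
      PySem.Set.contains (PySem.Set.empty : PySem.Set Int) ((k : Nat) : Int)
        = (pvFirstTheme [] (pvText (rs[k]'hk))).isSome := by
    intro k hk; simp [PySem.Set.empty, PySem.Set.contains, pvFirstTheme]
  obtain ⟨hb, hm⟩ := pvB_outer rs pvThemes [] PySem.Set.empty [] hCe
  have hnd : ((([] : List (String × List String)) ++ pvThemes).map (·.1)).Nodup := by decide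
  have hNBF := pvNBF_eq rs pvThemes [] hnd
  have hm' : ∀ (k : Nat) (hk : k < rs.length),
      PySem.Set.contains ((pvThemes.foldl (pvStepOuter rs) (PySem.Set.empty, [])).1) (((0 : Nat) + k : Nat) : Int)
        = (pvFirstTheme pvThemes (pvText (rs[k]'hk))).isSome := by
    intro k hk
    have := hm k hk
    simpa using this
  have hleft := pvB_leftover ((pvThemes.foldl (pvStepOuter rs) (PySem.Set.empty, [])).1) rs 0 [] hm'
  have hz : (((0:Nat) : Int)) = (0 : Int) := by norm_num
  rw [hz] at hleft
  -- the two bucket lists agree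
  have hbuckets : (pvThemes.foldl (pvStepOuter rs) (PySem.Set.empty, [])).2
      = pvThemes.map (fun p => rs.filter (fun r => decide (pvFirstTheme pvThemes (pvText r) = some p.1))) := by
    rw [hb]
    rw [show (([] : List (String × List String)) ++ pvThemes) = pvThemes from rfl] at hNBF
    rw [hNBF]
    simp [List.map_map, Function.comp_def]
  simp only [fallback_keyword_clustering_py, fallback_keyword_clustering_py_alt]
  rw [hA, hleft, hbuckets]
  rw [pvA_number]
  simp only [List.nil_append]
  congr 1
  by_cases hemp : (rs.filter (fun r => !(pvFirstTheme pvThemes (pvText r)).isSome)).isEmpty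
  · rw [if_pos hemp, if_pos hemp]
    simp [List.map_map, Function.comp_def]
  · rw [if_neg hemp, if_neg hemp]
    simp [List.map_map, Function.comp_def]
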